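-- pv_equiv track=rewrite | github.com/parvsondhi/NLPFinal2016 | app/showcase.py | topicFeaturesExtract
-- ===== SOURCE A (Python) =====
-- def topicFeaturesExtract(tweet):
--     tweetWords = set(tweet.split())
--     topics = ['email', 'russia', 'race', 'immigration', 'trust', 'sex', 'female', 'male']
--     output = [0] * len(topics)
--
--     wordLists = {}
--     wordLists['email']  = ['emails', 'email', 'crookedhillary', 'prison', 'crooked']
--     wordLists['russia'] =  ['putin', 'russia', 'crimea', 'vladimir', 'ukraine', 'russian']
--     wordLists['race']   = ['white', 'black', 'racist', 'race']
--     wordLists['immigration'] = ['borders', 'border', 'wall', 'mexico', 'illegal', 'immigrants', 'immigration',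
--                                'trafficking']
--     wordLists['trust'] = ['factcheck', 'fact', 'factchecking', 'bigleaguetruth', 'trust', 'politifact',
--                           'trustworthiness', 'lies', 'lie', 'truth', 'liar']
--     wordLists['sex'] = ['sex', 'sexual', 'assault', 'rape', 'rapist', 'transgression', 'transgressions']
--
--     wordLists['female'] = ['she', 'her', 'she\'s', 'herself']
--     wordLists['male'] = ['he', 'his', 'he\'s', 'himself', 'him']
--
--     for idx, val in enumerate(topics):
--         if len(tweetWords.intersection(wordLists[val])) > 0:
--             output[idx] = 1
--         else:
--             output[idx] = 0
--
--     return output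
-- ===== SOURCE B (Python) =====
-- def topicFeaturesExtract(tweet):
--     wordLists = [
--         ['emails', 'email', 'crookedhillary', 'prison', 'crooked'],
--         ['putin', 'russia', 'crimea', 'vladimir', 'ukraine', 'russian'],
--         ['white', 'black', 'racist', 'race'],
--         ['borders', 'border', 'wall', 'mexico', 'illegal', 'immigrants', 'immigration', 'trafficking'],
--         ['factcheck', 'fact', 'factchecking', 'bigleaguetruth', 'trust', 'politifact',
--          'trustworthiness', 'lies', 'lie', 'truth', 'liar'],
--         ['sex', 'sexual', 'assault', 'rape', 'rapist', 'transgression', 'transgressions'],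
--         ["she", "her", "she's", "herself"],
--         ["he", "his", "he's", "himself", "him"],
--     ]
--     index = {}
--     for i, words in enumerate(wordLists):
--         for w in words:
--             index[w] = i
--     output = [0] * len(wordLists)
--     for w in tweet.split():
--         i = index.get(w)
--         if i is not None:
--             output[i] = 1
--     return output
-- ===== Notes on version B (the rewrite author's own statement) =====
-- stated objective: idiomatic
-- what changed: Replaces the per-topic set-intersection scans with an inverted keyword-to-topic-index dict built once, then a single pass over the tweet's words that flags the looked-up topic.
import Mathlib
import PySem

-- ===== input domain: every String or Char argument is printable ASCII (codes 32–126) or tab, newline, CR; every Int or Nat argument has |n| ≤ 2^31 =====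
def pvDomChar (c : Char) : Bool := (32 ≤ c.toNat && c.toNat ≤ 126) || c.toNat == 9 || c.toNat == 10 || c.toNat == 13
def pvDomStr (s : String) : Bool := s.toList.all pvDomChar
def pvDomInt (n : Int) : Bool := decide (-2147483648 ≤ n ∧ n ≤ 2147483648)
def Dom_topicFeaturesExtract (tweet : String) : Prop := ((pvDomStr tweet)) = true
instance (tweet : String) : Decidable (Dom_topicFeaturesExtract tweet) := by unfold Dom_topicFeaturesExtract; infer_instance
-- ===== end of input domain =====

set_option maxRecDepth 100000
set_option maxHeartbeats 1600000


-- B replaces A's per-topic intersection scans by an inverted keyword -> topic-index dict and one pass over the tweet's words (objective: idiomatic).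

-- ===== PORT A =====
def topicFeaturesExtract (tweet : String) : List Int :=
  let tweetWords : PySem.Set String := PySem.Set.ofList (PySem.Str.split₀ tweet)
  let topics : List String := ["email", "russia", "race", "immigration", "trust", "sex", "female", "male"]
  let output : List Int := List.replicate topics.length 0
  let wordLists : PySem.Dict String (List String) :=
    (((((((PySem.Dict.empty.insert "email" ["emails", "email", "crookedhillary", "prison", "crooked"]).insert
      "russia" ["putin", "russia", "crimea", "vladimir", "ukraine", "russian"]).insert
      "race" ["white", "black", "racist", "race"]).insert
      "immigration" ["borders", "border", "wall", "mexico", "illegal", "immigrants", "immigration", "trafficking"]).insert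
      "trust" ["factcheck", "fact", "factchecking", "bigleaguetruth", "trust", "politifact", "trustworthiness", "lies", "lie", "truth", "liar"]).insert
      "sex" ["sex", "sexual", "assault", "rape", "rapist", "transgression", "transgressions"]).insert
      "female" ["she", "her", "she's", "herself"]).insert
      "male" ["he", "his", "he's", "himself", "him"]
  (PySem.List.enumerate topics 0).foldl (fun out p =>
    if 0 < PySem.Set.len (PySem.Set.inter tweetWords (wordLists.getD p.2 [])) then
      PySem.List.pySetD out p.1 1
    else
      PySem.List.pySetD out p.1 0) output

-- ===== PORT B =====
-- B-side helper: the topic word lists, in topic order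
def pvWordLists : List (List String) :=
  [["emails", "email", "crookedhillary", "prison", "crooked"],
   ["putin", "russia", "crimea", "vladimir", "ukraine", "russian"],
   ["white", "black", "racist", "race"],
   ["borders", "border", "wall", "mexico", "illegal", "immigrants", "immigration", "trafficking"],
   ["factcheck", "fact", "factchecking", "bigleaguetruth", "trust", "politifact", "trustworthiness", "lies", "lie", "truth", "liar"],
   ["sex", "sexual", "assault", "rape", "rapist", "transgression", "transgressions"],
   ["she", "her", "she's", "herself"],
   ["he", "his", "he's", "himself", "him"]]

-- B-side helper: the inverted index keyword -> topic index ('index' in Source B)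
def pvIndex : PySem.Dict String Int :=
  (PySem.List.enumerate pvWordLists 0).foldl
    (fun d p => p.2.foldl (fun d w => d.insert w p.1) d) PySem.Dict.empty

-- B-side helper: the body of Source B's loop over the tweet's words
def pvStep (out : List Int) (w : String) : List Int :=
  match pvIndex.get? w with
  | some i => PySem.List.pySetD out i 1
  | none => out

def topicFeaturesExtract_alt (tweet : String) : List Int :=
  let output : List Int := List.replicate pvWordLists.length 0
  (PySem.Str.split₀ tweet).foldl pvStep output

-- ===== PRECONDITION & SPEC =====
def Spec_topicFeaturesExtract (tweet : String) (out : List Int) : Prop := out = topicFeaturesExtract_alt tweet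
instance (tweet : String) (out : List Int) : Decidable (Spec_topicFeaturesExtract tweet out) := by unfold Spec_topicFeaturesExtract; infer_instance

-- ===== CLAIM (what is proved, stated in full; the proofs are below) =====
def Claim_equal_topicFeaturesExtract : Prop := ∀ (tweet : String), Dom_topicFeaturesExtract tweet → Spec_topicFeaturesExtract tweet (topicFeaturesExtract tweet)

-- ===== LEMMAS AND PROOFS =====

-- a nonempty intersection of set(xs) with a list is some member of xs being in the list
theorem inter_pos (xs l : List String) :
    (0 < PySem.Set.len (PySem.Set.inter (PySem.Set.ofList xs) l)) ↔
      xs.any (fun w => l.contains w) = true := by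
  simp [PySem.Set.len, PySem.Set.inter, List.length_pos_iff, List.eq_nil_iff_forall_not_mem,
        List.mem_filter, PySem.Set.mem_ofList, List.any_eq_true]

-- the concrete insert chain pvIndex's construction unfolds to
theorem pvIndex_eq : pvIndex =
    ((((((((((((((((((((((((((((((((((((((((((((((((((PySem.Dict.empty.insert "emails" (0 : Int)).insert "email" (0 : Int)).insert "crookedhillary" (0 : Int)).insert "prison" (0 : Int)).insert "crooked" (0 : Int)).insert "putin" (1 : Int)).insert "russia" (1 : Int)).insert "crimea" (1 : Int)).insert "vladimir" (1 : Int)).insert "ukraine" (1 : Int)).insert "russian" (1 : Int)).insert "white" (2 : Int)).insert "black" (2 : Int)).insert "racist" (2 : Int)).insert "race" (2 : Int)).insert "borders" (3 : Int)).insert "border" (3 : Int)).insert "wall" (3 : Int)).insert "mexico" (3 : Int)).insert "illegal" (3 : Int)).insert "immigrants" (3 : Int)).insert "immigration" (3 : Int)).insert "trafficking" (3 : Int)).insert "factcheck" (4 : Int)).insert "fact" (4 : Int)).insert "factchecking" (4 : Int)).insert "bigleaguetruth" (4 : Int)).insert "trust" (4 : Int)).insert "politifact" (4 : Int)).insert "trustworthiness"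 (4 : Int)).insert "lies" (4 : Int)).insert "lie" (4 : Int)).insert "truth" (4 : Int)).insert "liar" (4 : Int)).insert "sex" (5 : Int)).insert "sexual" (5 : Int)).insert "assault" (5 : Int)).insert "rape" (5 : Int)).insert "rapist" (5 : Int)).insert "transgression" (5 : Int)).insert "transgressions" (5 : Int)).insert "she" (6 : Int)).insert "her" (6 : Int)).insert "she's" (6 : Int)).insert "herself" (6 : Int)).insert "he" (7 : Int)).insert "his" (7 : Int)).insert "he's" (7 : Int)).insert "himself" (7 : Int)).insert "him" (7 : Int)) := by
  simp only [pvIndex, pvWordLists, PySem.List.enumerate_cons, PySem.List.enumerate_nil,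
    List.foldl_cons, List.foldl_nil, Int.reduceAdd]

-- lookup in the inverted index, as a decision chain on the word
theorem pvIndex_get (w : String) : pvIndex.get? w =
    (if w = "him" then some (7 : Int) else if w = "himself" then some (7 : Int) else if w = "he's" then some (7 : Int) else if w = "his" then some (7 : Int) else if w = "he" then some (7 : Int) else if w = "herself" then some (6 : Int) else if w = "she's" then some (6 : Int) else if w = "her" then some (6 : Int) else if w = "she" then some (6 : Int) else if w = "transgressions" then some (5 : Int) else if w = "transgression" then some (5 : Int) else if w = "rapist" then some (5 : Int) else if w = "rape" then some (5 : Int) else if w = "assault" then some (5 : Int) else if w = "sexual" then some (5 : Int) else if w = "sex" then some (5 : Int) else if w = "liar" then some (4 : Int) else if w = "truth" then some (4 : Int) else if w = "lie" then some (4 : Int) else if w = "lies" then some (4 : Int) else if w = "trustworthiness" then some (4 : Int) else if w = "politifact" then some (4 : Int) else if w = "trust" then some (4 : Int) else if w = "bigleaguetruth" then some (4 : Int) else if w = "factchecking" then some (4 : Int) else if w = "fact" then some (4 : Int) else if w = "factcheck" then some (4 : Int) else if w = "trafficking" then some (3 : Int) else if w = "immigration" then some (3 : Int) else if w = "immigrants"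 then some (3 : Int) else if w = "illegal" then some (3 : Int) else if w = "mexico" then some (3 : Int) else if w = "wall" then some (3 : Int) else if w = "border" then some (3 : Int) else if w = "borders" then some (3 : Int) else if w = "race" then some (2 : Int) else if w = "racist" then some (2 : Int) else if w = "black" then some (2 : Int) else if w = "white" then some (2 : Int) else if w = "russian" then some (1 : Int) else if w = "ukraine" then some (1 : Int) else if w = "vladimir" then some (1 : Int) else if w = "crimea" then some (1 : Int) else if w = "russia" then some (1 : Int) else if w = "putin" then some (1 : Int) else if w = "crooked" then some (0 : Int) else if w = "prison" then some (0 : Int) else if w = "crookedhillary" then some (0 : Int) else if w = "email" then some (0 : Int) else if w = "emails" then some (0 : Int) else none) := by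
  rw [pvIndex_eq]
  simp only [PySem.Dict.get?_insert, PySem.Dict.get?_empty]

-- for each topic: a keyword of that topic hits exactly its index, and the word-list memberships it decides
theorem pvhit0 : ∀ w ∈ (["emails", "email", "crookedhillary", "prison", "crooked"] : List String),
    pvIndex.get? w = some 0 ∧ (["emails", "email", "crookedhillary", "prison", "crooked"] : List String).contains w = true ∧ (["putin", "russia", "crimea", "vladimir", "ukraine", "russian"] : List String).contains w = false ∧ (["white", "black", "racist", "race"] : List String).contains w = false ∧ (["borders", "border", "wall", "mexico", "illegal", "immigrants", "immigration", "trafficking"] : List String).contains w = false ∧ (["factcheck", "fact", "factchecking", "bigleaguetruth", "trust", "politifact", "trustworthiness", "lies", "lie", "truth", "liar"] : List String).contains w = false ∧ (["sex", "sexual", "assault", "rape", "rapist", "transgression", "transgressions"] : List String).contains w = false ∧ (["she", "her", "she's", "herself"] : List String).contains w = false ∧ (["he", "his", "he's", "himself", "him"] : List String).contains w = false := by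
  intro w h
  fin_cases h <;> simp [pvIndex_get]
theorem pvhit1 : ∀ w ∈ (["putin", "russia", "crimea", "vladimir", "ukraine", "russian"] : List String),
    pvIndex.get? w = some 1 ∧ (["emails", "email", "crookedhillary", "prison", "crooked"] : List String).contains w = false ∧ (["putin", "russia", "crimea", "vladimir", "ukraine", "russian"] : List String).contains w = true ∧ (["white", "black", "racist", "race"] : List String).contains w = false ∧ (["borders", "border", "wall", "mexico", "illegal", "immigrants", "immigration", "trafficking"] : List String).contains w = false ∧ (["factcheck", "fact", "factchecking", "bigleaguetruth", "trust", "politifact", "trustworthiness", "lies", "lie", "truth", "liar"] : List String).contains w = false ∧ (["sex", "sexual", "assault", "rape", "rapist", "transgression", "transgressions"] : List String).contains w = false ∧ (["she", "her", "she's", "herself"] : List String).contains w = false ∧ (["he", "his", "he's", "himself", "him"] : List String).contains w = false := by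
  intro w h
  fin_cases h <;> simp [pvIndex_get]
theorem pvhit2 : ∀ w ∈ (["white", "black", "racist", "race"] : List String),
    pvIndex.get? w = some 2 ∧ (["emails", "email", "crookedhillary", "prison", "crooked"] : List String).contains w = false ∧ (["putin", "russia", "crimea", "vladimir", "ukraine", "russian"] : List String).contains w = false ∧ (["white", "black", "racist", "race"] : List String).contains w = true ∧ (["borders", "border", "wall", "mexico", "illegal", "immigrants", "immigration", "trafficking"] : List String).contains w = false ∧ (["factcheck", "fact", "factchecking", "bigleaguetruth", "trust", "politifact", "trustworthiness", "lies", "lie", "truth", "liar"] : List String).contains w = false ∧ (["sex", "sexual", "assault", "rape", "rapist", "transgression", "transgressions"] : List String).contains w = false ∧ (["she", "her", "she's", "herself"] : List String).contains w = false ∧ (["he", "his", "he's", "himself", "him"] : List String).contains w = false := by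
  intro w h
  fin_cases h <;> simp [pvIndex_get]
theorem pvhit3 : ∀ w ∈ (["borders", "border", "wall", "mexico", "illegal", "immigrants", "immigration", "trafficking"] : List String),
    pvIndex.get? w = some 3 ∧ (["emails", "email", "crookedhillary", "prison", "crooked"] : List String).contains w = false ∧ (["putin", "russia", "crimea", "vladimir", "ukraine", "russian"] : List String).contains w = false ∧ (["white", "black", "racist", "race"] : List String).contains w = false ∧ (["borders", "border", "wall", "mexico", "illegal", "immigrants", "immigration", "trafficking"] : List String).contains w = true ∧ (["factcheck", "fact", "factchecking", "bigleaguetruth", "trust", "politifact", "trustworthiness", "lies", "lie", "truth", "liar"] : List String).contains w = false ∧ (["sex", "sexual", "assault", "rape", "rapist", "transgression", "transgressions"] : List String).contains w = false ∧ (["she", "her", "she's", "herself"] : List String).contains w = false ∧ (["he", "his", "he's", "himself", "him"] : List String).contains w = false := by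
  intro w h
  fin_cases h <;> simp [pvIndex_get]
theorem pvhit4 : ∀ w ∈ (["factcheck", "fact", "factchecking", "bigleaguetruth", "trust", "politifact", "trustworthiness", "lies", "lie", "truth", "liar"] : List String),
    pvIndex.get? w = some 4 ∧ (["emails", "email", "crookedhillary", "prison", "crooked"] : List String).contains w = false ∧ (["putin", "russia", "crimea", "vladimir", "ukraine", "russian"] : List String).contains w = false ∧ (["white", "black", "racist", "race"] : List String).contains w = false ∧ (["borders", "border", "wall", "mexico", "illegal", "immigrants", "immigration", "trafficking"] : List String).contains w = false ∧ (["factcheck", "fact", "factchecking", "bigleaguetruth", "trust", "politifact", "trustworthiness", "lies", "lie", "truth", "liar"] : List String).contains w = true ∧ (["sex", "sexual", "assault", "rape", "rapist", "transgression", "transgressions"] : List String).contains w = false ∧ (["she", "her", "she's", "herself"] : List String).contains w = false ∧ (["he", "his", "he's", "himself", "him"] : List String).contains w = false := by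
  intro w h
  fin_cases h <;> simp [pvIndex_get]
theorem pvhit5 : ∀ w ∈ (["sex", "sexual", "assault", "rape", "rapist", "transgression", "transgressions"] : List String),
    pvIndex.get? w = some 5 ∧ (["emails", "email", "crookedhillary", "prison", "crooked"] : List String).contains w = false ∧ (["putin", "russia", "crimea", "vladimir", "ukraine", "russian"] : List String).contains w = false ∧ (["white", "black", "racist", "race"] : List String).contains w = false ∧ (["borders", "border", "wall", "mexico", "illegal", "immigrants", "immigration", "trafficking"] : List String).contains w = false ∧ (["factcheck", "fact", "factchecking", "bigleaguetruth", "trust", "politifact", "trustworthiness", "lies", "lie", "truth", "liar"] : List String).contains w = false ∧ (["sex", "sexual", "assault", "rape", "rapist", "transgression", "transgressions"] : List String).contains w = true ∧ (["she", "her", "she's", "herself"] : List String).contains w = false ∧ (["he", "his", "he's", "himself", "him"] : List String).contains w = false := by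
  intro w h
  fin_cases h <;> simp [pvIndex_get]
theorem pvhit6 : ∀ w ∈ (["she", "her", "she's", "herself"] : List String),
    pvIndex.get? w = some 6 ∧ (["emails", "email", "crookedhillary", "prison", "crooked"] : List String).contains w = false ∧ (["putin", "russia", "crimea", "vladimir", "ukraine", "russian"] : List String).contains w = false ∧ (["white", "black", "racist", "race"] : List String).contains w = false ∧ (["borders", "border", "wall", "mexico", "illegal", "immigrants", "immigration", "trafficking"] : List String).contains w = false ∧ (["factcheck", "fact", "factchecking", "bigleaguetruth", "trust", "politifact", "trustworthiness", "lies", "lie", "truth", "liar"] : List String).contains w = false ∧ (["sex", "sexual", "assault", "rape", "rapist", "transgression", "transgressions"] : List String).contains w = false ∧ (["she", "her", "she's", "herself"] : List String).contains w = true ∧ (["he", "his", "he's", "himself", "him"] : List String).contains w = false := by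
  intro w h
  fin_cases h <;> simp [pvIndex_get]
theorem pvhit7 : ∀ w ∈ (["he", "his", "he's", "himself", "him"] : List String),
    pvIndex.get? w = some 7 ∧ (["emails", "email", "crookedhillary", "prison", "crooked"] : List String).contains w = false ∧ (["putin", "russia", "crimea", "vladimir", "ukraine", "russian"] : List String).contains w = false ∧ (["white", "black", "racist", "race"] : List String).contains w = false ∧ (["borders", "border", "wall", "mexico", "illegal", "immigrants", "immigration", "trafficking"] : List String).contains w = false ∧ (["factcheck", "fact", "factchecking", "bigleaguetruth", "trust", "politifact", "trustworthiness", "lies", "lie", "truth", "liar"] : List String).contains w = false ∧ (["sex", "sexual", "assault", "rape", "rapist", "transgression", "transgressions"] : List String).contains w = false ∧ (["she", "her", "she's", "herself"] : List String).contains w = false ∧ (["he", "his", "he's", "himself", "him"] : List String).contains w = true := by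
  intro w h
  fin_cases h <;> simp [pvIndex_get]

-- B's fold, characterised entrywise on an arbitrary word list and start state
theorem b_fold (xs : List String) : ∀ o0 o1 o2 o3 o4 o5 o6 o7 : Int,
    xs.foldl pvStep [o0, o1, o2, o3, o4, o5, o6, o7] =
    [(if xs.any (fun w => (["emails", "email", "crookedhillary", "prison", "crooked"] : List String).contains w) then 1 else o0),
     (if xs.any (fun w => (["putin", "russia", "crimea", "vladimir", "ukraine", "russian"] : List String).contains w) then 1 else o1),
     (if xs.any (fun w => (["white", "black", "racist", "race"] : List String).contains w) then 1 else o2),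
     (if xs.any (fun w => (["borders", "border", "wall", "mexico", "illegal", "immigrants", "immigration", "trafficking"] : List String).contains w) then 1 else o3),
     (if xs.any (fun w => (["factcheck", "fact", "factchecking", "bigleaguetruth", "trust", "politifact", "trustworthiness", "lies", "lie", "truth", "liar"] : List String).contains w) then 1 else o4),
     (if xs.any (fun w => (["sex", "sexual", "assault", "rape", "rapist", "transgression", "transgressions"] : List String).contains w) then 1 else o5),
     (if xs.any (fun w => (["she", "her", "she's", "herself"] : List String).contains w) then 1 else o6),
     (if xs.any (fun w => (["he", "his", "he's", "himself", "him"] : List String).contains w) then 1 else o7)] := by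
  induction xs with
  | nil => intro o0 o1 o2 o3 o4 o5 o6 o7; simp
  | cons w xs ih =>
    intro o0 o1 o2 o3 o4 o5 o6 o7
    simp only [List.foldl_cons, List.any_cons]
    by_cases h0 : w ∈ (["emails", "email", "crookedhillary", "prison", "crooked"] : List String)
    · obtain ⟨hg, c0, c1, c2, c3, c4, c5, c6, c7⟩ := pvhit0 w h0
      rw [show pvStep [o0, o1, o2, o3, o4, o5, o6, o7] w = PySem.List.pySetD [o0, o1, o2, o3, o4, o5, o6, o7] 0 1 from by simp [pvStep, hg],
          show PySem.List.pySetD [o0, o1, o2, o3, o4, o5, o6, o7] 0 1 = [1, o1, o2, o3, o4, o5, o6, o7] from rfl, ih]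
      simp only [c0, c1, c2, c3, c4, c5, c6, c7, Bool.true_or, Bool.false_or, ite_self, if_true]
    by_cases h1 : w ∈ (["putin", "russia", "crimea", "vladimir", "ukraine", "russian"] : List String)
    · obtain ⟨hg, c0, c1, c2, c3, c4, c5, c6, c7⟩ := pvhit1 w h1
      rw [show pvStep [o0, o1, o2, o3, o4, o5, o6, o7] w = PySem.List.pySetD [o0, o1, o2, o3, o4, o5, o6, o7] 1 1 from by simp [pvStep, hg],
          show PySem.List.pySetD [o0, o1, o2, o3, o4, o5, o6, o7] 1 1 = [o0, 1, o2, o3, o4, o5, o6, o7] from rfl, ih]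
      simp only [c0, c1, c2, c3, c4, c5, c6, c7, Bool.true_or, Bool.false_or, ite_self, if_true]
    by_cases h2 : w ∈ (["white", "black", "racist", "race"] : List String)
    · obtain ⟨hg, c0, c1, c2, c3, c4, c5, c6, c7⟩ := pvhit2 w h2
      rw [show pvStep [o0, o1, o2, o3, o4, o5, o6, o7] w = PySem.List.pySetD [o0, o1, o2, o3, o4, o5, o6, o7] 2 1 from by simp [pvStep, hg],
          show PySem.List.pySetD [o0, o1, o2, o3, o4, o5, o6, o7] 2 1 = [o0, o1, 1, o3, o4, o5, o6, o7] from rfl, ih]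
      simp only [c0, c1, c2, c3, c4, c5, c6, c7, Bool.true_or, Bool.false_or, ite_self, if_true]
    by_cases h3 : w ∈ (["borders", "border", "wall", "mexico", "illegal", "immigrants", "immigration", "trafficking"] : List String)
    · obtain ⟨hg, c0, c1, c2, c3, c4, c5, c6, c7⟩ := pvhit3 w h3
      rw [show pvStep [o0, o1, o2, o3, o4, o5, o6, o7] w = PySem.List.pySetD [o0, o1, o2, o3, o4, o5, o6, o7] 3 1 from by simp [pvStep, hg],
          show PySem.List.pySetD [o0, o1, o2, o3, o4, o5, o6, o7] 3 1 = [o0, o1, o2, 1, o4, o5, o6, o7] from rfl, ih]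
      simp only [c0, c1, c2, c3, c4, c5, c6, c7, Bool.true_or, Bool.false_or, ite_self, if_true]
    by_cases h4 : w ∈ (["factcheck", "fact", "factchecking", "bigleaguetruth", "trust", "politifact", "trustworthiness", "lies", "lie", "truth", "liar"] : List String)
    · obtain ⟨hg, c0, c1, c2, c3, c4, c5, c6, c7⟩ := pvhit4 w h4
      rw [show pvStep [o0, o1, o2, o3, o4, o5, o6, o7] w = PySem.List.pySetD [o0, o1, o2, o3, o4, o5, o6, o7] 4 1 from by simp [pvStep, hg],
          show PySem.List.pySetD [o0, o1, o2, o3, o4, o5, o6, o7] 4 1 = [o0, o1, o2, o3, 1, o5, o6, o7] from rfl, ih]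
      simp only [c0, c1, c2, c3, c4, c5, c6, c7, Bool.true_or, Bool.false_or, ite_self, if_true]
    by_cases h5 : w ∈ (["sex", "sexual", "assault", "rape", "rapist", "transgression", "transgressions"] : List String)
    · obtain ⟨hg, c0, c1, c2, c3, c4, c5, c6, c7⟩ := pvhit5 w h5
      rw [show pvStep [o0, o1, o2, o3, o4, o5, o6, o7] w = PySem.List.pySetD [o0, o1, o2, o3, o4, o5, o6, o7] 5 1 from by simp [pvStep, hg],
          show PySem.List.pySetD [o0, o1, o2, o3, o4, o5, o6, o7] 5 1 = [o0, o1, o2, o3, o4, 1, o6, o7] from rfl, ih]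
      simp only [c0, c1, c2, c3, c4, c5, c6, c7, Bool.true_or, Bool.false_or, ite_self, if_true]
    by_cases h6 : w ∈ (["she", "her", "she's", "herself"] : List String)
    · obtain ⟨hg, c0, c1, c2, c3, c4, c5, c6, c7⟩ := pvhit6 w h6
      rw [show pvStep [o0, o1, o2, o3, o4, o5, o6, o7] w = PySem.List.pySetD [o0, o1, o2, o3, o4, o5, o6, o7] 6 1 from by simp [pvStep, hg],
          show PySem.List.pySetD [o0, o1, o2, o3, o4, o5, o6, o7] 6 1 = [o0, o1, o2, o3, o4, o5, 1, o7] from rfl, ih]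
      simp only [c0, c1, c2, c3, c4, c5, c6, c7, Bool.true_or, Bool.false_or, ite_self, if_true]
    by_cases h7 : w ∈ (["he", "his", "he's", "himself", "him"] : List String)
    · obtain ⟨hg, c0, c1, c2, c3, c4, c5, c6, c7⟩ := pvhit7 w h7
      rw [show pvStep [o0, o1, o2, o3, o4, o5, o6, o7] w = PySem.List.pySetD [o0, o1, o2, o3, o4, o5, o6, o7] 7 1 from by simp [pvStep, hg],
          show PySem.List.pySetD [o0, o1, o2, o3, o4, o5, o6, o7] 7 1 = [o0, o1, o2, o3, o4, o5, o6, 1] from rfl, ih]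
      simp only [c0, c1, c2, c3, c4, c5, c6, c7, Bool.true_or, Bool.false_or, ite_self, if_true]
    have c0 : (["emails", "email", "crookedhillary", "prison", "crooked"] : List String).contains w = false := by simpa using h0
    have c1 : (["putin", "russia", "crimea", "vladimir", "ukraine", "russian"] : List String).contains w = false := by simpa using h1
    have c2 : (["white", "black", "racist", "race"] : List String).contains w = false := by simpa using h2
    have c3 : (["borders", "border", "wall", "mexico", "illegal", "immigrants", "immigration", "trafficking"] : List String).contains w = false := by simpa using h3
    have c4 : (["factcheck", "fact", "factchecking", "bigleaguetruth", "trust", "politifact", "trustworthiness", "lies", "lie", "truth", "liar"] : List String).contains w = false := by simpa using h4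
    have c5 : (["sex", "sexual", "assault", "rape", "rapist", "transgression", "transgressions"] : List String).contains w = false := by simpa using h5
    have c6 : (["she", "her", "she's", "herself"] : List String).contains w = false := by simpa using h6
    have c7 : (["he", "his", "he's", "himself", "him"] : List String).contains w = false := by simpa using h7
    simp only [List.mem_cons, List.not_mem_nil, not_or, or_false] at h0 h1 h2 h3 h4 h5 h6 h7
    obtain ⟨m1, m2, m3, m4, m5⟩ := h0
    obtain ⟨m6, m7, m8, m9, m10, m11⟩ := h1
    obtain ⟨m12, m13, m14, m15⟩ := h2
    obtain ⟨m16, m17, m18, m19, m20, m21, m22, m23⟩ := h3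
    obtain ⟨m24, m25, m26, m27, m28, m29, m30, m31, m32, m33, m34⟩ := h4
    obtain ⟨m35, m36, m37, m38, m39, m40, m41⟩ := h5
    obtain ⟨m42, m43, m44, m45⟩ := h6
    obtain ⟨m46, m47, m48, m49, m50⟩ := h7
    have hn : pvIndex.get? w = none := by
      rw [pvIndex_get]; simp only [m1, m2, m3, m4, m5, m6, m7, m8, m9, m10, m11, m12, m13, m14, m15, m16, m17, m18, m19, m20, m21, m22, m23, m24, m25, m26, m27, m28, m29, m30, m31, m32, m33, m34, m35, m36, m37, m38, m39, m40, m41, m42, m43, m44, m45, m46, m47, m48, m49, m50, if_false]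
    rw [show pvStep [o0, o1, o2, o3, o4, o5, o6, o7] w = [o0, o1, o2, o3, o4, o5, o6, o7] from by simp [pvStep, hn], ih]
    simp only [c0, c1, c2, c3, c4, c5, c6, c7, Bool.false_or]

-- an 'if c: out[i]=1 else: out[i]=0' step is one write of an if-value
theorem ite_setD (c : Prop) [Decidable c] (out : List Int) (i : Int) :
    (if c then PySem.List.pySetD out i 1 else PySem.List.pySetD out i 0) =
      PySem.List.pySetD out i (if c then 1 else 0) := by
  split_ifs <;> rfl

theorem pvSet0 (a0 a1 a2 a3 a4 a5 a6 a7 v : Int) :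
    PySem.List.pySetD [a0, a1, a2, a3, a4, a5, a6, a7] 0 v = [v, a1, a2, a3, a4, a5, a6, a7] := rfl
theorem pvSet1 (a0 a1 a2 a3 a4 a5 a6 a7 v : Int) :
    PySem.List.pySetD [a0, a1, a2, a3, a4, a5, a6, a7] 1 v = [a0, v, a2, a3, a4, a5, a6, a7] := rfl
theorem pvSet2 (a0 a1 a2 a3 a4 a5 a6 a7 v : Int) :
    PySem.List.pySetD [a0, a1, a2, a3, a4, a5, a6, a7] 2 v = [a0, a1, v, a3, a4, a5, a6, a7] := rfl
theorem pvSet3 (a0 a1 a2 a3 a4 a5 a6 a7 v : Int) :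
    PySem.List.pySetD [a0, a1, a2, a3, a4, a5, a6, a7] 3 v = [a0, a1, a2, v, a4, a5, a6, a7] := rfl
theorem pvSet4 (a0 a1 a2 a3 a4 a5 a6 a7 v : Int) :
    PySem.List.pySetD [a0, a1, a2, a3, a4, a5, a6, a7] 4 v = [a0, a1, a2, a3, v, a5, a6, a7] := rfl
theorem pvSet5 (a0 a1 a2 a3 a4 a5 a6 a7 v : Int) :
    PySem.List.pySetD [a0, a1, a2, a3, a4, a5, a6, a7] 5 v = [a0, a1, a2, a3, a4, v, a6, a7] := rfl
theorem pvSet6 (a0 a1 a2 a3 a4 a5 a6 a7 v : Int) :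
    PySem.List.pySetD [a0, a1, a2, a3, a4, a5, a6, a7] 6 v = [a0, a1, a2, a3, a4, a5, v, a7] := rfl
theorem pvSet7 (a0 a1 a2 a3 a4 a5 a6 a7 v : Int) :
    PySem.List.pySetD [a0, a1, a2, a3, a4, a5, a6, a7] 7 v = [a0, a1, a2, a3, a4, a5, a6, v] := rfl

-- ===== VERDICT (by name: the statement is the Claim_ definition above) =====
theorem topicFeaturesExtract_spec : Claim_equal_topicFeaturesExtract := by
  intro tweet _
  unfold Spec_topicFeaturesExtract topicFeaturesExtract topicFeaturesExtract_alt
  rw [show pvWordLists.length = 8 from rfl, show (List.replicate 8 (0:Int)) = [0,0,0,0,0,0,0,0] from rfl,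
      b_fold]
  simp only [PySem.List.enumerate_cons, PySem.List.enumerate_nil, List.foldl_cons, List.foldl_nil,
    List.length_cons, List.length_nil, Nat.reduceAdd]
  simp only [PySem.Dict.getD_insert, String.reduceEq, reduceIte]
  rw [show (List.replicate 8 (0:Int)) = [0,0,0,0,0,0,0,0] from rfl]
  simp only [ite_setD]
  simp only [Int.reduceAdd]
  simp only [pvSet0, pvSet1, pvSet2, pvSet3, pvSet4, pvSet5, pvSet6, pvSet7]
  simp only [inter_pos]
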